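-- pv_equiv track=rewrite | github.com/jacobpeart-cyber/pysoar | src/services/automation.py | _is_private_or_reserved_ipv4
-- ===== SOURCE A (Python) =====
-- def _is_private_or_reserved_ipv4(value: str) -> bool:
--     """Return True if the IPv4 falls in a private/loopback/link-local
--     range we deliberately skip when extracting IOCs from alert text,
--     so the TI DB doesn't fill up with 10.x / 192.168.x internal hosts.
--     """
--     try:
--         parts = [int(p) for p in value.split(".")]
--         if len(parts) != 4 or any(p < 0 or p > 255 for p in parts):
--             return True
--     except (ValueError, AttributeError):
--         return True
--     a, b, _, _ = parts
--     if value in ("0.0.0.0", "127.0.0.1", "255.255.255.255"):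
--         return True
--     if a == 10:
--         return True
--     if a == 127:
--         return True
--     if a == 192 and b == 168:
--         return True
--     if a == 172 and 16 <= b <= 31:
--         return True
--     if a == 169 and b == 254:  # link-local
--         return True
--     if a >= 224:  # multicast & reserved
--         return True
--     return False
-- ===== SOURCE B (Python) =====
-- # Same parsing/guards as the original, but the per-octet branch cascade is
-- # replaced by packing the address into one 32-bit integer and scanning a
-- # table of reserved numeric ranges.
--
-- _RESERVED_RANGES = [
--     (0x0A000000, 0x0AFFFFFF),  # 10.0.0.0/8
--     (0x7F000000, 0x7FFFFFFF),  # 127.0.0.0/8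
--     (0xA9FE0000, 0xA9FEFFFF),  # 169.254.0.0/16
--     (0xAC100000, 0xAC1FFFFF),  # 172.16.0.0/12
--     (0xC0A80000, 0xC0A8FFFF),  # 192.168.0.0/16
--     (0xE0000000, 0xFFFFFFFF),  # 224.0.0.0/3 multicast & reserved
-- ]
--
--
-- def _is_private_or_reserved_ipv4(value: str) -> bool:
--     try:
--         parts = [int(p) for p in value.split(".")]
--     except (ValueError, AttributeError):
--         return True
--     if len(parts) != 4 or any(p < 0 or p > 255 for p in parts):
--         return True
--     if value in ("0.0.0.0", "127.0.0.1", "255.255.255.255"):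
--         return True
--     a, b, c, d = parts
--     n = ((a * 256 + b) * 256 + c) * 256 + d
--     return any(lo <= n <= hi for lo, hi in _RESERVED_RANGES)
-- ===== Notes on version B (the rewrite author's own statement) =====
-- stated objective: idiomatic
-- what changed: The cascade of discrete per-octet if-branches is replaced by packing the four octets into one 32-bit integer and scanning a data table of reserved numeric ranges.
import Mathlib
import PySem

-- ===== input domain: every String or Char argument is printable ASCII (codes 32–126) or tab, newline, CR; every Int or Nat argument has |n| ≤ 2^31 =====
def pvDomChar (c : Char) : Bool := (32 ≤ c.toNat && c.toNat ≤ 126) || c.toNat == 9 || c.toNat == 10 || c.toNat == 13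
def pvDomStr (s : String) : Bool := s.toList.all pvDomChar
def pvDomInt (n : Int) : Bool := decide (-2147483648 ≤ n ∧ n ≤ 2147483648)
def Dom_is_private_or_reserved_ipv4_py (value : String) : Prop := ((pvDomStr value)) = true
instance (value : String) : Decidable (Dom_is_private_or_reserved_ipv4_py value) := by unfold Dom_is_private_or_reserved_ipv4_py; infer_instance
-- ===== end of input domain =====

-- B replaces A's per-octet branch cascade by one packed 32-bit integer tested against a table of reserved ranges (idiomatic, same cost).

-- ===== PORT A =====
-- `[int(p) for p in value.split(".")]`; none = the ValueError caught by A's try/except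
def pvParseOctets (value : String) : Option (List Int) :=
  (PySem.Chars.splitOn value.toList ".".toList).mapM PySem.Int.ofChars?

def is_private_or_reserved_ipv4_py (value : String) : Bool :=
  match pvParseOctets value with
  | none => true
  | some parts =>
    if parts.length ≠ 4 ∨ parts.any (fun p => decide (p < 0 ∨ p > 255)) then true
    else
      match parts with
      | [a, b, _, _] =>
        if value = "0.0.0.0" ∨ value = "127.0.0.1" ∨ value = "255.255.255.255" then true
        else if a = 10 then true
        else if a = 127 then true
        else if a = 192 ∧ b = 168 then true
        else if a = 172 ∧ 16 ≤ b ∧ b ≤ 31 then true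
        else if a = 169 ∧ b = 254 then true
        else if a ≥ 224 then true
        else false
      | _ => true

-- ===== PORT B =====
-- B's copy of the same parsing comprehension (B keeps A's guards verbatim)
def pvParseOctetsAlt (value : String) : Option (List Int) :=
  (PySem.Chars.splitOn value.toList ".".toList).mapM PySem.Int.ofChars?

def pvReservedRanges : List (Int × Int) :=
  [(0x0A000000, 0x0AFFFFFF), (0x7F000000, 0x7FFFFFFF), (0xA9FE0000, 0xA9FEFFFF),
   (0xAC100000, 0xAC1FFFFF), (0xC0A80000, 0xC0A8FFFF), (0xE0000000, 0xFFFFFFFF)]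

def is_private_or_reserved_ipv4_py_alt (value : String) : Bool :=
  (pvParseOctetsAlt value).elim true (fun parts =>
    if parts.length ≠ 4 ∨ parts.any (fun p => decide (p < 0 ∨ p > 255)) then true
    else if value = "0.0.0.0" ∨ value = "127.0.0.1" ∨ value = "255.255.255.255" then true
    else
      -- `a, b, c, d = parts` (length 4 already checked)
      let a := parts.getD 0 0
      let b := parts.getD 1 0
      let c := parts.getD 2 0
      let d := parts.getD 3 0
      let n := ((a * 256 + b) * 256 + c) * 256 + d
      pvReservedRanges.any (fun r => decide (r.1 ≤ n ∧ n ≤ r.2)))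

-- ===== PRECONDITION & SPEC =====
def Spec_is_private_or_reserved_ipv4_py (value : String) (out : Bool) : Prop := out = is_private_or_reserved_ipv4_py_alt value
instance (value : String) (out : Bool) : Decidable (Spec_is_private_or_reserved_ipv4_py value out) := by unfold Spec_is_private_or_reserved_ipv4_py; infer_instance

-- ===== CLAIM (what is proved, stated in full; the proofs are below) =====
def Claim_equal_is_private_or_reserved_ipv4_py : Prop := ∀ (value : String), Dom_is_private_or_reserved_ipv4_py value → Spec_is_private_or_reserved_ipv4_py value (is_private_or_reserved_ipv4_py value)

-- ===== LEMMAS AND PROOFS =====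
-- Core arithmetic fact: on in-range octets the branch cascade and the range table agree.
theorem pv_core (a b c d : Int) (ha : 0 ≤ a ∧ a ≤ 255) (hb : 0 ≤ b ∧ b ≤ 255)
    (hc : 0 ≤ c ∧ c ≤ 255) (hd : 0 ≤ d ∧ d ≤ 255) :
    (if a = 10 then true
     else if a = 127 then true
     else if a = 192 ∧ b = 168 then true
     else if a = 172 ∧ 16 ≤ b ∧ b ≤ 31 then true
     else if a = 169 ∧ b = 254 then true
     else if a ≥ 224 then true
     else false)
    = pvReservedRanges.any (fun r => decide (r.1 ≤ ((a * 256 + b) * 256 + c) * 256 + d ∧ ((a * 256 + b) * 256 + c) * 256 + d ≤ r.2)) := by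
  rw [Bool.eq_iff_iff]
  simp only [pvReservedRanges, List.any_cons, List.any_nil, Bool.or_eq_true,
    decide_eq_true_eq, Bool.false_eq_true]
  split_ifs <;> simp_all <;> omega

theorem is_private_or_reserved_ipv4_py_spec : Claim_equal_is_private_or_reserved_ipv4_py := by
  intro value _
  unfold Spec_is_private_or_reserved_ipv4_py
  unfold is_private_or_reserved_ipv4_py is_private_or_reserved_ipv4_py_alt
  rw [show pvParseOctetsAlt value = pvParseOctets value from rfl]
  cases hp : pvParseOctets value with
  | none => rfl
  | some parts =>
    dsimp only [Option.elim]
    by_cases hlen : parts.length ≠ 4 ∨ (parts.any fun p => decide (p < 0 ∨ p > 255)) = true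
    · rw [if_pos hlen, if_pos hlen]
    · rw [if_neg hlen, if_neg hlen]
      have h4 : parts.length = 4 := by
        by_contra h
        exact hlen (Or.inl h)
      have hr : (parts.any fun p => decide (p < 0 ∨ p > 255)) = false := by
        cases hA : (parts.any fun p => decide (p < 0 ∨ p > 255)) with
        | false => rfl
        | true => exact absurd (Or.inr hA) hlen
      match parts, h4 with
      | [a, b, c, d], _ =>
        simp only [List.any_cons, List.any_nil, Bool.or_eq_false_iff,
          decide_eq_false_iff_not, not_or, not_lt] at hr
        dsimp only
        by_cases hstr : value = "0.0.0.0" ∨ value = "127.0.0.1" ∨ value = "255.255.255.255"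
        · rw [if_pos hstr, if_pos hstr]
        · rw [if_neg hstr, if_neg hstr]
          simp only [List.getD_cons_zero, List.getD_cons_succ]
          exact pv_core a b c d (by omega) (by omega) (by omega) (by omega)
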